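-- pv_equiv track=rewrite | github.com/kellysjung/advent-of-code | 2020/day_10/solution1.py | calculate_jolt_differences
-- ===== SOURCE A (Python) =====
-- def calculate_jolt_differences(input):
--     input.sort()
--     i = 0
--     one_count = 1
--     three_count = 1
--
--     while i < len(input) - 1:
--         difference = input[i+1] - input[i]
--         if difference == 1:
--             one_count += 1
--         elif difference == 3:
--             three_count += 1
--         else:
--             return -1
--         i += 1
--
--     return one_count * three_count
-- ===== SOURCE B (Python) =====
-- def calculate_jolt_differences(input):
--     # Counts derived in closed form from the telescoping sum: if every adjacent
--     # gap is 1 or 3, then c1 + 3*c3 = max - min and c1 + c3 = n - 1.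
--     input.sort()  # same in-place sort as A (observable mutation)
--     if any(b - a not in (1, 3) for a, b in zip(input, input[1:])):
--         return -1
--     if not input:
--         return 1
--     span = input[-1] - input[0]
--     gaps = len(input) - 1
--     three_count = (span - gaps) // 2
--     return (gaps - three_count + 1) * (three_count + 1)
-- ===== Notes on version B (the rewrite author's own statement) =====
-- stated objective: alternative
-- what changed: A counts 1-gaps and 3-gaps explicitly in an index-driven loop; B only validates the gaps, then derives both counts in closed form from the telescoping identities c1+3*c3 = max-min and c1+c3 = n-1, so no counting pass exists at all.
import Mathlib
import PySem

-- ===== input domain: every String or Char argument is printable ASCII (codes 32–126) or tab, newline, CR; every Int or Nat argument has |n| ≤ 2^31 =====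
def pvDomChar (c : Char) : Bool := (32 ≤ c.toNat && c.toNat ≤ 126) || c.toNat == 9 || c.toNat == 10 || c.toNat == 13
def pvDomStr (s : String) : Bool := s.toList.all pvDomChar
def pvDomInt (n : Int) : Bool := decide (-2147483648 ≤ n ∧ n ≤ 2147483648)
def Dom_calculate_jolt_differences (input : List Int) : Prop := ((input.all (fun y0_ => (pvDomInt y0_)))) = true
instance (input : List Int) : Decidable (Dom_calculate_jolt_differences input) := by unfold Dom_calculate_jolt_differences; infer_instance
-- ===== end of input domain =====

-- B replaces A's counting loop by a closed form: after validating that every adjacent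
-- gap is 1 or 3, the two counts follow from c1+3*c3 = max-min and c1+c3 = n-1.
-- Both Pythons sort the argument in place; the equivalence proved is about the return value.

-- ===== PORT A =====
-- while loop of A over the sorted list: state (one_count, three_count), early return -1
def aLoop : List Int → Int → Int → Int
  | a :: b :: rest, one, three =>
    if b - a = 1 then aLoop (b :: rest) (one + 1) three
    else if b - a = 3 then aLoop (b :: rest) one (three + 1)
    else -1
  | _, one, three => one * three

def calculate_jolt_differences (input : List Int) : Int :=
  aLoop (PySem.List.sorted input (fun x => x) false) 1 1

-- ===== PORT B =====
def calculate_jolt_differences_alt (input : List Int) : Int :=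
  let s := PySem.List.sorted input (fun x => x) false
  if (s.zip s.tail).any (fun p => ¬(p.2 - p.1 = 1 ∨ p.2 - p.1 = 3)) then -1
  else
    match s with
    | [] => 1
    | a :: t =>
      -- input[-1] - input[0] on the nonempty sorted list (exact: List.getLastD t a is s[-1])
      let span := List.getLastD t a - a
      let gaps := (s.length : Int) - 1
      let three_count := PySem.Int.floordiv (span - gaps) 2
      (gaps - three_count + 1) * (three_count + 1)

-- ===== PRECONDITION & SPEC =====
def Spec_calculate_jolt_differences (input : List Int) (out : Int) : Prop := out = calculate_jolt_differences_alt input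
instance (input : List Int) (out : Int) : Decidable (Spec_calculate_jolt_differences input out) := by unfold Spec_calculate_jolt_differences; infer_instance

-- ===== CLAIM (what is proved, stated in full; the proofs are below) =====
def Claim_equal_calculate_jolt_differences : Prop := ∀ (input : List Int), Dom_calculate_jolt_differences input → Spec_calculate_jolt_differences input (calculate_jolt_differences input)

-- ===== LEMMAS AND PROOFS =====

-- A's loop in terms of the adjacent-difference list: validity check + counts
theorem aLoop_char (l : List Int) : ∀ (one three : Int),
    aLoop l one three =
      (let diffs := (l.zip l.tail).map (fun p => p.2 - p.1)
       if diffs.all (fun d => d = 1 || d = 3) then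
         (one + diffs.count 1) * (three + diffs.count 3)
       else -1) := by
  induction l with
  | nil => intro one three; simp [aLoop]
  | cons a t ih =>
    intro one three
    cases t with
    | nil => simp [aLoop]
    | cons b rest =>
      simp only [aLoop, List.zip_cons_cons, List.tail_cons, List.map_cons, List.all_cons,
        List.count_cons]
      by_cases ht :
          ((((b :: rest).zip rest).map (fun p => p.2 - p.1)).all
            (fun d => decide (d = 1) || decide (d = 3))) = true
      · by_cases h1 : b - a = 1
        · rw [if_pos h1, ih]
          simp [List.tail_cons, ht, h1]
          exact Or.inl (by ring)
        · by_cases h3 : b - a = 3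
          · rw [if_neg h1, if_pos h3, ih]
            simp [List.tail_cons, ht, h3]
            exact Or.inl (by ring)
          · rw [if_neg h1, if_neg h3, if_neg (by simp [h1, h3])]
      · by_cases h1 : b - a = 1
        · rw [if_pos h1, ih]
          simp [List.tail_cons, ht]
        · by_cases h3 : b - a = 3
          · rw [if_neg h1, if_pos h3, ih]
            simp [List.tail_cons, ht]
          · rw [if_neg h1, if_neg h3, if_neg (by simp [h1, h3])]

-- telescoping: the adjacent differences of a::t sum to last - first
theorem sum_diffs (t : List Int) : ∀ (a : Int),
    ((((a :: t).zip t).map (fun p => p.2 - p.1)).sum) = List.getLastD t a - a := by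
  induction t with
  | nil => intro a; simp
  | cons b rest ih =>
    intro a
    simp only [List.zip_cons_cons, List.map_cons, List.sum_cons, List.getLastD_cons, ih b]
    ring

-- when every diff is 1 or 3, the sum and length determine both counts
theorem counts_of_valid (ds : List Int)
    (h : ds.all (fun d => d = 1 || d = 3) = true) :
    ds.sum = (ds.count 1 : Int) + 3 * (ds.count 3 : Int) ∧
      ((ds.count 1 : Int) + (ds.count 3 : Int)) = ds.length := by
  induction ds with
  | nil => simp
  | cons d rest ih =>
    simp only [List.all_cons, Bool.and_eq_true] at h
    obtain ⟨hd, hr⟩ := h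
    obtain ⟨hs, hl⟩ := ih hr
    rcases (by simpa using hd : d = 1 ∨ d = 3) with h1 | h3
    · subst h1
      constructor <;> · simp [hs]; omega
    · subst h3
      constructor <;> · simp [hs]; omega

-- the two bodies agree on an arbitrary (sorted) list
theorem bodies_eq (s : List Int) :
    aLoop s 1 1 =
      (if (s.zip s.tail).any (fun p => ¬(p.2 - p.1 = 1 ∨ p.2 - p.1 = 3)) then (-1 : Int)
       else
         match s with
         | [] => 1
         | a :: t =>
           let span := List.getLastD t a - a
           let gaps := (s.length : Int) - 1
           let three_count := PySem.Int.floordiv (span - gaps) 2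
           (gaps - three_count + 1) * (three_count + 1)) := by
  rw [aLoop_char]
  cases s with
  | nil => simp
  | cons a t =>
    simp only [List.tail_cons]
    set ds := ((a :: t).zip t).map (fun p => p.2 - p.1) with hds
    have hguard : (((a :: t).zip t).any fun p => decide ¬(p.2 - p.1 = 1 ∨ p.2 - p.1 = 3)) =
        !(ds.all fun d => decide (d = 1) || decide (d = 3)) := by
      rw [hds]
      simp only [List.all_map, Function.comp_def, decide_not, Bool.decide_or]
      rw [← List.not_all_eq_any_not]
    rw [hguard]
    by_cases hv : (ds.all fun d => decide (d = 1) || decide (d = 3)) = true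
    · rw [if_pos hv, hv]
      simp only [Bool.not_true, Bool.false_eq_true, if_false]
      obtain ⟨hsum, hlen⟩ := counts_of_valid ds hv
      have hspan : ds.sum = List.getLastD t a - a := by
        rw [hds]; simpa using sum_diffs t a
      have hdlen : (ds.length : Int) = (t.length : Int) := by
        simp [hds]
      have hc3 : PySem.Int.floordiv ((List.getLastD t a - a) - (((a :: t).length : Int) - 1)) 2
          = (ds.count 3 : Int) := by
        have h2 : (List.getLastD t a - a) - (((a :: t).length : Int) - 1)
            = 2 * (ds.count 3 : Int) := by
          rw [← hspan]
          simp only [List.length_cons]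
          push_cast
          omega
        rw [h2, PySem.Int.floordiv_eq_ediv_of_pos (by norm_num)]
        exact Int.mul_ediv_cancel_left _ (by norm_num)
      simp only [hc3]
      have hc1 : (((a :: t).length : Int) - 1) - (ds.count 3 : Int) = (ds.count 1 : Int) := by
        simp only [List.length_cons]
        push_cast
        omega
      rw [hc1]
      ring
    · rw [if_neg hv]
      simp [hv]

-- ===== VERDICT (by name: the statement is the Claim_ definition above) =====
theorem calculate_jolt_differences_spec : Claim_equal_calculate_jolt_differences := by
  intro input _
  unfold Spec_calculate_jolt_differences calculate_jolt_differences calculate_jolt_differences_alt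
  exact bodies_eq (PySem.List.sorted input (fun x => x) false)
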